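-- pv_equiv track=rewrite | github.com/leo-t-1/CipherProbe | cipherprobe.py | vowel_split_dec
-- ===== SOURCE A (Python) =====
-- VOWELS = set('aeiouAEIOU')
--
-- CONSONANTS_LOWER = 'bcdfghjklmnpqrstvwxyz'  # 21 letters
--
-- def shift_consonant(ch, amount):
--     """Shift a consonant within the 21-letter consonant alphabet."""
--     idx = CONSONANTS_LOWER.index(ch.lower())
--     new = CONSONANTS_LOWER[(idx + amount) % 21]
--     return new.upper() if ch.isupper() else new
--
-- def vowel_split_dec(text):
--     # Undo step 2 — unshift consonants within consonant alphabet
--     mid, ci = [], 0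
--     for ch in text:
--         if ch.isalpha() and ch not in VOWELS:
--             mid.append(shift_consonant(ch, -ci))
--             ci += 1
--         else:
--             mid.append(ch)
--
--     # Undo step 1 — reverse vowels back
--     vowels = [ch for ch in mid if ch in VOWELS]
--     vowels.reverse()
--     result = []
--     vi = 0
--     for ch in mid:
--         if ch in VOWELS:
--             v = vowels[vi]
--             result.append(v.upper() if ch.isupper() else v.lower())
--             vi += 1
--         else:
--             result.append(ch)
--     return ''.join(result)
-- ===== SOURCE B (Python) =====
-- VOWELS = set('aeiouAEIOU')
--
-- CONSONANTS_LOWER = 'bcdfghjklmnpqrstvwxyz'  # 21 letters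
--
-- def shift_consonant(ch, amount):
--     idx = CONSONANTS_LOWER.index(ch.lower())
--     new = CONSONANTS_LOWER[(idx + amount) % 21]
--     return new.upper() if ch.isupper() else new
--
-- def vowel_split_dec(text):
--     # Phase 1 (unchanged): unshift consonants within the consonant alphabet
--     mid, ci = [], 0
--     for ch in text:
--         if ch.isalpha() and ch not in VOWELS:
--             mid.append(shift_consonant(ch, -ci))
--             ci += 1
--         else:
--             mid.append(ch)
--
--     # Phase 2: reverse the vowels in place with two pointers
--     # (case is taken from the destination position, letter from the source)
--     i, j = 0, len(mid) - 1
--     while i < j: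
--         if mid[i] not in VOWELS:
--             i += 1
--         elif mid[j] not in VOWELS:
--             j -= 1
--         else:
--             a, b = mid[i], mid[j]
--             mid[i] = b.upper() if a.isupper() else b.lower()
--             mid[j] = a.upper() if b.isupper() else a.lower()
--             i += 1
--             j -= 1
--     return ''.join(mid)
-- ===== Notes on version B (the rewrite author's own statement) =====
-- stated objective: alternative
-- what changed: Phase 2's extract-all-vowels/reverse/reinsert-with-counter pass is replaced by an in-place two-pointer vowel reversal on the phase-1 output (no auxiliary reversed vowel list); phase 1 is kept.
import Mathlib
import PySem

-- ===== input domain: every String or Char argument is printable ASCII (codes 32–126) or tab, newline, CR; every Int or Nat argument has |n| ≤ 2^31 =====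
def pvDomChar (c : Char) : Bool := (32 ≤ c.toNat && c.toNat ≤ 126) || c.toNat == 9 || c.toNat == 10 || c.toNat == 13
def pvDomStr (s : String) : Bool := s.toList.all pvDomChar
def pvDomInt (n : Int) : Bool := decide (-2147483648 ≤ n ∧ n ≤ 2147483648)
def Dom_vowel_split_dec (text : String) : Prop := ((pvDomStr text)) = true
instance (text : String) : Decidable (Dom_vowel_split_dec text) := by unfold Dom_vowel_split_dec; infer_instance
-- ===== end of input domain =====

-- B keeps A's phase 1 (consonant unshift) and replaces phase 2's extract/reverse/reinsert of the
-- vowels by an in-place two-pointer reversal; equivalence over all printable-ASCII strings.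

-- ===== PORT A =====
-- shared module constants (both Pythons carry the same VOWELS / CONSONANTS_LOWER / shift_consonant / phase-1 loop)
def pvVowels : PySem.Set Char := PySem.Set.ofList "aeiouAEIOU".toList

def pvConsonantsLower : List Char := "bcdfghjklmnpqrstvwxyz".toList

def pvIsV (c : Char) : Bool := PySem.Set.contains pvVowels c

-- CONSONANTS_LOWER.index raises ValueError only for non-ASCII letters, excluded by Dom; the .getD 0
-- arm is unreachable on Dom.  The computed index (idx+amount) % 21 is always in range (getD ' ' unreachable).
def shift_consonant (ch : Char) (amount : Int) : Char :=
  let idx : Nat := (PySem.List.index? pvConsonantsLower (PySem.Chars.lowerChar ch)).getD 0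
  let new : Char := (PySem.List.pyGetD pvConsonantsLower (PySem.Int.mod ((idx : Int) + amount) 21) ' ')
  if PySem.Chars.isupper ch then PySem.Chars.upperChar new else new

-- phase 1: identical in both Pythons (the loop building `mid` with counter ci)
def pvMidStep (acc : List Char × Int) (ch : Char) : List Char × Int :=
  if PySem.Chars.isalpha ch && !(PySem.Set.contains pvVowels ch) then
    (acc.1 ++ [shift_consonant ch (-acc.2)], acc.2 + 1)
  else (acc.1 ++ [ch], acc.2)

def pvMid (cs : List Char) : List Char := (cs.foldl pvMidStep ([], 0)).1

-- v.upper() if ch.isupper() else v.lower()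
def pvRecase (ch v : Char) : Char :=
  if PySem.Chars.isupper ch then PySem.Chars.upperChar v else PySem.Chars.lowerChar v

-- phase 2 of A: vowels extracted, reversed, reinserted with counter vi.
-- vowels[vi] is always in range (vi counts vowels already seen); the .getD ch arm is unreachable.
def pvPhase2A (mid : List Char) : List Char :=
  let vowels : List Char := (mid.filter pvIsV).reverse
  (mid.foldl (fun (acc : List Char × Nat) ch =>
      if pvIsV ch then
        (acc.1 ++ [pvRecase ch ((PySem.List.pyGet? vowels (acc.2 : Int)).getD ch)], acc.2 + 1)
      else (acc.1 ++ [ch], acc.2)) ([], 0)).1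

def vowel_split_dec (text : String) : String :=
  String.ofList (pvPhase2A (pvMid text.toList))

-- ===== PORT B =====
-- phase 2 of B: in-place two-pointer vowel reversal (mid[i]/mid[j] are in range: i < j ≤ len-1)
def pvTwoPtr (arr : List Char) (i j : Nat) : List Char :=
  if i < j then
    if !pvIsV (arr.getD i ' ') then pvTwoPtr arr (i + 1) j
    else if !pvIsV (arr.getD j ' ') then pvTwoPtr arr i (j - 1)
    else
      let a := arr.getD i ' '
      let b := arr.getD j ' '
      pvTwoPtr ((arr.set i (pvRecase a b)).set j (pvRecase b a)) (i + 1) (j - 1)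
  else arr
termination_by j - i
decreasing_by all_goals omega

def vowel_split_dec_alt (text : String) : String :=
  let mid := pvMid text.toList
  String.ofList (pvTwoPtr mid 0 (mid.length - 1))

-- ===== PRECONDITION & SPEC =====
def Spec_vowel_split_dec (text : String) (out : String) : Prop := out = vowel_split_dec_alt text
instance (text : String) (out : String) : Decidable (Spec_vowel_split_dec text out) := by unfold Spec_vowel_split_dec; infer_instance

-- ===== CLAIM (what is proved, stated in full; the proofs are below) =====
def Claim_equal_vowel_split_dec : Prop := ∀ (text : String), Dom_vowel_split_dec text → Spec_vowel_split_dec text (vowel_split_dec text)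

-- ===== LEMMAS AND PROOFS =====

-- vowel count of a list / the vowel sublist / the positional characterisation of the result
def pvCnt (cs : List Char) : Nat := List.countP pvIsV cs

def pvVF (mid : List Char) : List Char := mid.filter pvIsV

def pvF (mid : List Char) (p : Nat) : Char :=
  if pvIsV (mid.getD p ' ') then
    pvRecase (mid.getD p ' ') ((pvVF mid).reverse.getD (pvCnt (mid.take p)) ' ')
  else mid.getD p ' '

theorem pvRecase_self (c : Char) (h : pvIsV c = true) : pvRecase c c = c := by
  have hm : c ∈ ['a', 'e', 'i', 'o', 'u', 'A', 'E', 'I', 'O', 'U'] := by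
    have := h
    simp only [pvIsV, pvVowels, PySem.Set.contains, PySem.Set.ofList] at this
    simpa using this
  fin_cases hm <;> decide

-- counting lemmas
theorem pvCnt_split (mid : List Char) (p : Nat) :
    (pvVF mid).length = pvCnt (mid.take p) + pvCnt (mid.drop p) := by
  simp only [pvVF, pvCnt, ← List.countP_eq_length_filter]
  conv_lhs => rw [← List.take_append_drop p mid]
  rw [List.countP_append]

theorem pvCnt_drop_succ (mid : List Char) (p : Nat) (hp : p < mid.length) :
    pvCnt (mid.drop p) = (if pvIsV (mid.getD p ' ') then 1 else 0) + pvCnt (mid.drop (p + 1)) := by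
  rw [List.drop_eq_getElem_cons hp, List.getD_eq_getElem mid ' ' hp]
  simp only [pvCnt, List.countP_cons]
  by_cases h : pvIsV mid[p] = true <;> simp [h] <;> omega

theorem pvCnt_take_lt (mid : List Char) (p : Nat) (hp : p < mid.length)
    (hv : pvIsV (mid.getD p ' ') = true) : pvCnt (mid.take p) < (pvVF mid).length := by
  have h1 := pvCnt_split mid p
  have h2 := pvCnt_drop_succ mid p hp
  rw [if_pos hv] at h2
  omega

theorem pvVF_getD (mid : List Char) (p : Nat) (hp : p < mid.length)
    (hv : pvIsV (mid.getD p ' ') = true) :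
    (pvVF mid).getD (pvCnt (mid.take p)) ' ' = mid.getD p ' ' := by
  rw [List.getD_eq_getElem mid ' ' hp] at hv ⊢
  have hsplit : pvVF mid = (mid.take p).filter pvIsV ++ (mid[p] :: (mid.drop (p + 1)).filter pvIsV) := by
    rw [pvVF]
    conv_lhs => rw [← List.take_append_drop p mid]
    rw [List.filter_append, List.drop_eq_getElem_cons hp, List.filter_cons_of_pos hv]
  have hcnt : pvCnt (mid.take p) = ((mid.take p).filter pvIsV).length := by
    simp [pvCnt, List.countP_eq_length_filter]
  rw [hsplit, hcnt, List.getD_append_right _ _ _ _ (le_refl _)]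
  simp



theorem pvCnt_take_succ (mid : List Char) (p : Nat) (hp : p < mid.length) :
    pvCnt (mid.take (p + 1)) = pvCnt (mid.take p) + (if pvIsV (mid.getD p ' ') then 1 else 0) := by
  rw [List.take_succ_eq_append_getElem hp, List.getD_eq_getElem mid ' ' hp]
  simp only [pvCnt, List.countP_append, List.countP_cons, List.countP_nil]
  by_cases h : pvIsV mid[p] = true <;> simp [h]

theorem pvRev_getD (l : List Char) (k : Nat) (hk : k < l.length) :
    l.reverse.getD k ' ' = l.getD (l.length - 1 - k) ' ' := by
  rw [List.getD_eq_getElem _ ' ' (by simpa using hk), List.getD_eq_getElem _ ' ' (by omega)]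
  exact List.getElem_reverse _

-- ===== A side: the fold equals a structural build, characterised positionally =====
def pvBuildA (vs : List Char) : Nat → List Char → List Char
  | _, [] => []
  | vi, c :: cs =>
    if pvIsV c then
      pvRecase c ((PySem.List.pyGet? vs (vi : Int)).getD c) :: pvBuildA vs (vi + 1) cs
    else c :: pvBuildA vs vi cs

theorem pvFoldA (vs : List Char) : ∀ (cs acc : List Char) (vi : Nat),
    (cs.foldl (fun (acc : List Char × Nat) ch =>
        if pvIsV ch then
          (acc.1 ++ [pvRecase ch ((PySem.List.pyGet? vs (acc.2 : Int)).getD ch)], acc.2 + 1)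
        else (acc.1 ++ [ch], acc.2)) (acc, vi)).1 = acc ++ pvBuildA vs vi cs := by
  intro cs
  induction cs with
  | nil => intro acc vi; simp [pvBuildA]
  | cons c cs ih =>
    intro acc vi
    rw [List.foldl_cons]
    by_cases h : pvIsV c = true
    · simp only [h, if_true]
      rw [ih]
      simp [pvBuildA, h]
    · simp only [h, if_false, Bool.false_eq_true]
      rw [ih]
      simp [pvBuildA, h]

theorem pvPhase2A_eq (mid : List Char) :
    pvPhase2A mid = pvBuildA (mid.filter pvIsV).reverse 0 mid := by
  simp only [pvPhase2A]
  rw [pvFoldA]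
  simp

theorem pvBuildA_length (vs : List Char) : ∀ (cs : List Char) (vi : Nat),
    (pvBuildA vs vi cs).length = cs.length := by
  intro cs
  induction cs with
  | nil => intro vi; simp [pvBuildA]
  | cons c cs ih =>
    intro vi
    by_cases h : pvIsV c = true <;> simp [pvBuildA, h, ih]

theorem pvBuildA_getD (vs : List Char) : ∀ (cs : List Char) (vi p : Nat), p < cs.length →
    (pvBuildA vs vi cs).getD p ' ' =
      (if pvIsV (cs.getD p ' ') then
        pvRecase (cs.getD p ' ')
          ((PySem.List.pyGet? vs ((vi + pvCnt (cs.take p) : Nat) : Int)).getD (cs.getD p ' '))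
      else cs.getD p ' ') := by
  intro cs
  induction cs with
  | nil => intro vi p hp; simp at hp
  | cons c cs ih =>
    intro vi p hp
    cases p with
    | zero =>
      by_cases h : pvIsV c = true <;> simp [pvBuildA, h, pvCnt]
    | succ p =>
      have hp' : p < cs.length := by simpa using hp
      by_cases h : pvIsV c = true
      · have e : vi + 1 + pvCnt (cs.take p) = vi + pvCnt ((c :: cs).take (p + 1)) := by
          simp [pvCnt, List.take_succ_cons, h]
          omega
        simp only [pvBuildA, h, if_true, List.getD_cons_succ]
        rw [ih (vi + 1) p hp']
        rw [e]
      · have e : vi + pvCnt (cs.take p) = vi + pvCnt ((c :: cs).take (p + 1)) := by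
          simp [pvCnt, List.take_succ_cons, h]
        simp only [pvBuildA, h, if_false, Bool.false_eq_true, List.getD_cons_succ]
        rw [ih vi p hp']
        rw [e]

theorem pvA_length (mid : List Char) : (pvPhase2A mid).length = mid.length := by
  rw [pvPhase2A_eq]; exact pvBuildA_length _ mid 0

theorem pvA_getD (mid : List Char) (p : Nat) (hp : p < mid.length) :
    (pvPhase2A mid).getD p ' ' = pvF mid p := by
  rw [pvPhase2A_eq, pvBuildA_getD _ mid 0 p hp]
  unfold pvF
  by_cases h : pvIsV (mid.getD p ' ') = true
  · rw [if_pos h, if_pos h]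
    have hk0 : pvCnt (mid.take p) < (mid.filter pvIsV).reverse.length := by
      simpa [pvVF] using pvCnt_take_lt mid p hp h
    have hk1 : pvCnt (mid.take p) < (pvVF mid).reverse.length := by simpa [pvVF] using hk0
    rw [PySem.List.pyGet?_natCast]
    simp only [Nat.zero_add]
    rw [List.getElem?_eq_getElem hk0, Option.getD_some,
      List.getD_eq_getElem ((pvVF mid).reverse) ' ' hk1]
    simp [pvVF]
  · rw [if_neg h, if_neg h]

-- ===== B side: loop invariant of the two-pointer reversal =====
theorem pvTwoPtr_length : ∀ (n : Nat) (arr : List Char) (i j : Nat), j - i ≤ n →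
    (pvTwoPtr arr i j).length = arr.length := by
  intro n
  induction n with
  | zero =>
    intro arr i j hn
    rw [pvTwoPtr, if_neg (by omega)]
  | succ n ih =>
    intro arr i j hn
    rw [pvTwoPtr]
    by_cases hij : i < j
    · rw [if_pos hij]
      split_ifs with h1 h2
      · exact ih arr (i + 1) j (by omega)
      · exact ih arr i (j - 1) (by omega)
      · rw [ih _ (i + 1) (j - 1) (by omega)]
        simp
    · rw [if_neg hij]

theorem pvGetD_set (l : List Char) (k : Nat) (v : Char) (p : Nat) (hp : p < l.length) :
    (l.set k v).getD p ' ' = if k = p then v else l.getD p ' ' := by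
  rw [List.getD_eq_getElem (l.set k v) ' ' (by simpa using hp), List.getD_eq_getElem l ' ' hp]
  simp [List.getElem_set]

theorem pvMid_point (mid : List Char) (p : Nat) (hp : p < mid.length)
    (h6 : pvCnt (mid.take p) = pvCnt (mid.drop (p + 1))) :
    mid.getD p ' ' = pvF mid p := by
  unfold pvF
  by_cases hv : pvIsV (mid.getD p ' ') = true
  · rw [if_pos hv]
    have hm := pvCnt_split mid p
    have hd := pvCnt_drop_succ mid p hp
    rw [if_pos hv] at hd
    have ht : pvCnt (mid.take p) < (pvVF mid).length := pvCnt_take_lt mid p hp hv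
    rw [pvRev_getD _ _ ht]
    have e : (pvVF mid).length - 1 - pvCnt (mid.take p) = pvCnt (mid.take p) := by omega
    rw [e, pvVF_getD mid p hp hv, pvRecase_self _ hv]
  · rw [if_neg hv]

theorem pvCross (mid : List Char) (i j : Nat) (hi : i < mid.length) (hj : j < mid.length)
    (hvi : pvIsV (mid.getD i ' ') = true) (hvj : pvIsV (mid.getD j ' ') = true)
    (h6 : pvCnt (mid.take i) = pvCnt (mid.drop (j + 1))) :
    pvF mid i = pvRecase (mid.getD i ' ') (mid.getD j ' ') ∧
    pvF mid j = pvRecase (mid.getD j ' ') (mid.getD i ' ') := by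
  have hmj := pvCnt_split mid j
  have hdj := pvCnt_drop_succ mid j hj
  rw [if_pos hvj] at hdj
  have hti : pvCnt (mid.take i) < (pvVF mid).length := pvCnt_take_lt mid i hi hvi
  have htj : pvCnt (mid.take j) < (pvVF mid).length := pvCnt_take_lt mid j hj hvj
  constructor
  · unfold pvF
    rw [if_pos hvi, pvRev_getD _ _ hti]
    have e : (pvVF mid).length - 1 - pvCnt (mid.take i) = pvCnt (mid.take j) := by omega
    rw [e, pvVF_getD mid j hj hvj]
  · unfold pvF
    rw [if_pos hvj, pvRev_getD _ _ htj]
    have e : (pvVF mid).length - 1 - pvCnt (mid.take j) = pvCnt (mid.take i) := by omega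
    rw [e, pvVF_getD mid i hi hvi]

theorem pvTwoPtr_stop (mid arr : List Char) (i j : Nat) (hij : ¬ i < j)
    (h4 : ∀ p, i ≤ p → p ≤ j → arr.getD p ' ' = mid.getD p ' ')
    (h5 : ∀ p, p < mid.length → (p < i ∨ j < p) → arr.getD p ' ' = pvF mid p)
    (h6 : pvCnt (mid.take i) = pvCnt (mid.drop (j + 1))) :
    ∀ p, p < mid.length → (pvTwoPtr arr i j).getD p ' ' = pvF mid p := by
  intro p hp
  rw [pvTwoPtr, if_neg hij]
  rcases Nat.lt_or_ge p i with hpi | hpi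
  · exact h5 p hp (Or.inl hpi)
  rcases Nat.lt_or_ge j p with hpj | hpj
  · exact h5 p hp (Or.inr hpj)
  · have hpi' : p = i := by omega
    have hpj' : p = j := by omega
    rw [h4 p hpi (by omega)]
    apply pvMid_point mid p hp
    subst hpi'
    subst hpj'
    exact h6

theorem pvTwoPtr_master (mid : List Char) : ∀ (n : Nat) (arr : List Char) (i j : Nat),
    j - i ≤ n →
    arr.length = mid.length → j < mid.length → i ≤ j + 1 →
    (∀ p, i ≤ p → p ≤ j → arr.getD p ' ' = mid.getD p ' ') →
    (∀ p, p < mid.length → (p < i ∨ j < p) → arr.getD p ' ' = pvF mid p) →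
    pvCnt (mid.take i) = pvCnt (mid.drop (j + 1)) →
    ∀ p, p < mid.length → (pvTwoPtr arr i j).getD p ' ' = pvF mid p := by
  intro n
  induction n with
  | zero =>
    intro arr i j hn h1 hj h3 h4 h5 h6 p hp
    exact pvTwoPtr_stop mid arr i j (by omega) h4 h5 h6 p hp
  | succ n ih =>
    intro arr i j hn h1 hj h3 h4 h5 h6 p hp
    by_cases hij : i < j
    · rw [pvTwoPtr, if_pos hij]
      have hiL : i < mid.length := by omega
      have hai : arr.getD i ' ' = mid.getD i ' ' := h4 i (Nat.le_refl i) (by omega)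
      have haj : arr.getD j ' ' = mid.getD j ' ' := h4 j (by omega) (Nat.le_refl j)
      by_cases hvi : pvIsV (mid.getD i ' ') = true
      · by_cases hvj : pvIsV (mid.getD j ' ') = true
        · -- both ends vowels: swap with recasing
          rw [if_neg (by rw [hai, hvi]; decide), if_neg (by rw [haj, hvj]; decide)]
          obtain ⟨hFi, hFj⟩ := pvCross mid i j hiL hj hvi hvj h6
          show (pvTwoPtr
              ((arr.set i (pvRecase (arr.getD i ' ') (arr.getD j ' '))).set j
                (pvRecase (arr.getD j ' ') (arr.getD i ' ')))
              (i + 1) (j - 1)).getD p ' ' = pvF mid p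
          rw [hai, haj]
          have hget : ∀ q, q < mid.length →
              (((arr.set i (pvRecase (mid.getD i ' ') (mid.getD j ' '))).set j
                (pvRecase (mid.getD j ' ') (mid.getD i ' '))).getD q ' ')
              = if j = q then pvRecase (mid.getD j ' ') (mid.getD i ' ')
                else if i = q then pvRecase (mid.getD i ' ') (mid.getD j ' ')
                else arr.getD q ' ' := by
            intro q hq
            rw [pvGetD_set _ j _ q (by simpa [h1] using hq),
              pvGetD_set arr i _ q (by simpa [h1] using hq)]
          refine ih _ (i + 1) (j - 1) (by omega) (by simp [h1]) (by omega) (by omega)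
            ?_ ?_ ?_ p hp
          · intro q hq1 hq2
            rw [hget q (by omega), if_neg (by omega), if_neg (by omega)]
            exact h4 q (by omega) (by omega)
          · intro q hq hor
            rw [hget q hq]
            by_cases hqj : j = q
            · rw [if_pos hqj, ← hqj]
              exact hFj.symm
            · rw [if_neg hqj]
              by_cases hqi : i = q
              · rw [if_pos hqi, ← hqi]
                exact hFi.symm
              · rw [if_neg hqi]
                apply h5 q hq
                rcases hor with h' | h'
                · exact Or.inl (by omega)
                · exact Or.inr (by omega)
          · rw [pvCnt_take_succ mid i hiL, if_pos hvi]
            have e : j - 1 + 1 = j := by omega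
            rw [e]
            have hd := pvCnt_drop_succ mid j hj
            rw [if_pos hvj] at hd
            omega
        · -- right end not a vowel: move j left
          have hvj' : pvIsV (mid.getD j ' ') = false := by simpa using hvj
          rw [if_neg (by rw [hai, hvi]; decide), if_pos (by rw [haj, hvj']; rfl)]
          refine ih arr i (j - 1) (by omega) h1 (by omega) (by omega)
            (fun q hq1 hq2 => h4 q hq1 (by omega)) ?_ ?_ p hp
          · intro q hq hor
            rcases hor with h' | h'
            · exact h5 q hq (Or.inl h')
            · by_cases hqj : q = j
              · subst hqj
                rw [haj]
                unfold pvF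
                rw [if_neg hvj]
              · exact h5 q hq (Or.inr (by omega))
          · have e : j - 1 + 1 = j := by omega
            rw [e]
            have hd := pvCnt_drop_succ mid j hj
            rw [if_neg hvj] at hd
            omega
      · -- left end not a vowel: move i right
        have hvi' : pvIsV (mid.getD i ' ') = false := by simpa using hvi
        rw [if_pos (by rw [hai, hvi']; rfl)]
        refine ih arr (i + 1) j (by omega) h1 hj (by omega)
          (fun q hq1 hq2 => h4 q (by omega) hq2) ?_ ?_ p hp
        · intro q hq hor
          rcases hor with h' | h'
          · rcases Nat.lt_or_ge q i with h'' | h''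
            · exact h5 q hq (Or.inl h'')
            · have : q = i := by omega
              subst this
              rw [hai]
              unfold pvF
              rw [if_neg hvi]
          · exact h5 q hq (Or.inr h')
        · rw [pvCnt_take_succ mid i hiL, if_neg hvi]
          simpa using h6
    · exact pvTwoPtr_stop mid arr i j hij h4 h5 h6 p hp

theorem pvMain (mid : List Char) : pvPhase2A mid = pvTwoPtr mid 0 (mid.length - 1) := by
  rcases mid with _ | ⟨c, cs⟩
  · rw [pvTwoPtr]; rfl
  · set m := c :: cs with hm
    have hlen : m.length - 1 < m.length := by simp [hm]
    have h1 : (pvPhase2A m).length = m.length := pvA_length m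
    have h2 : (pvTwoPtr m 0 (m.length - 1)).length = m.length :=
      pvTwoPtr_length (m.length) m 0 (m.length - 1) (by omega)
    apply List.ext_getElem (by omega)
    intro p hpa hpb
    have hp : p < m.length := by omega
    have ha := pvA_getD m p hp
    have hb := pvTwoPtr_master m (m.length) m 0 (m.length - 1) (by omega) rfl hlen (by omega)
      (fun _ _ _ => rfl)
      (fun q hq hor => by omega)
      (by
        have e : m.length - 1 + 1 = m.length := by simp [hm]
        rw [e, List.drop_length]
        simp [pvCnt])
      p hp
    rw [List.getD_eq_getElem _ ' ' hpa] at ha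
    rw [List.getD_eq_getElem _ ' ' hpb] at hb
    rw [ha, hb]

-- ===== VERDICT (by name: the statement is the Claim_ definition above) =====
theorem vowel_split_dec_spec : Claim_equal_vowel_split_dec := by
  intro text _
  unfold Spec_vowel_split_dec vowel_split_dec vowel_split_dec_alt
  rw [pvMain]
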